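-- pv_equiv track=rewrite | github.com/ryanvilbrandt/personal | verymal.py | string_to_pixels
-- ===== SOURCE A (Python) =====
-- def normalize_color(c):
--     """
--     Takes a character and converts it to a value between 0 and 255.
--     :param c:
--     :return:
--     """
--     # scale = (255 - 0) / (122 - 97)
--     # return max(min(ceil((ord(c.lower()) - 97) * scale), 255), 0)
--     return ord(c)
--
-- def string_to_pixels(s):
--     """
--     Converts a string to a list of RGB tuples. For example, "ABCDE" converts to [(65, 66, 67), (68, 69, 0)]
--     Actual values depend on the normalize_colors() function.
--     :param s:
--     :return:
--     """
--     pixel_list = []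
--     pixel = []
--     for c in s:
--         pixel.append(normalize_color(c))
--         if len(pixel) == 3:
--             pixel_list.append(tuple(pixel))
--             pixel = []
--     # Pad any leftover values with 0 to make a whole pixel
--     if len(pixel) > 0:
--         while len(pixel) < 3:
--             pixel.append(0)
--         pixel_list.append(tuple(pixel))
--     return tuple(pixel_list)
-- ===== SOURCE B (Python) =====
-- def normalize_color(c):
--     return ord(c)
--
-- def string_to_pixels(s):
--     # step over chunk start indices; pad each slice to 3 with zeros
--     return tuple(
--         tuple(normalize_color(c) for c in s[i:i + 3]) + (0,) * (3 - len(s[i:i + 3]))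
--         for i in range(0, len(s), 3)
--     )
-- ===== Notes on version B (the rewrite author's own statement) =====
-- stated objective: simpler
-- what changed: Replaces the character-by-character loop with a mutable partial-pixel accumulator and a trailing pad-while loop by a single comprehension over chunk start indices range(0, len(s), 3), slicing s[i:i+3] and padding each slice arithmetically with (0,)*(3-len(chunk)).
import Mathlib
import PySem

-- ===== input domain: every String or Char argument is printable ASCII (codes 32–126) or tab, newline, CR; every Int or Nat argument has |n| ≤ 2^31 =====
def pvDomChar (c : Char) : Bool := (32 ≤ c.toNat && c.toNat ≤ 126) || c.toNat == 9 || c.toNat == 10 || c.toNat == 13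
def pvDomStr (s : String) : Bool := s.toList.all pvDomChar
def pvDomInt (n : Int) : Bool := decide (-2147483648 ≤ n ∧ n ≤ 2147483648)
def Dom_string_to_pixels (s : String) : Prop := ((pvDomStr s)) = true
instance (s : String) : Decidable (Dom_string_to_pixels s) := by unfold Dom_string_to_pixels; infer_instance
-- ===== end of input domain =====

-- B replaces A's per-character accumulator and pad-while loop by one pass over chunk
-- start indices with slicing and arithmetic padding (objective: simpler).

-- ===== PORT A =====
def normalize_color (c : Char) : Int := Int.ofNat c.toNat

-- tuple(pixel) for the 3-element pixel list, under the fixed-triple type convention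
def pvTriple (px : List Int) : Int × Int × Int :=
  match px with
  | [x, y, z] => (x, y, z)
  | _ => (0, 0, 0)

-- the 'for c in s' loop: state is (pixel_list, pixel)
def stpLoop : List Char → List (Int × Int × Int) → List Int →
    List (Int × Int × Int) × List Int
  | [], pixel_list, pixel => (pixel_list, pixel)
  | c :: rest, pixel_list, pixel =>
      let pixel' := pixel ++ [normalize_color c]
      if pixel'.length = 3 then
        stpLoop rest (pixel_list ++ [pvTriple pixel']) []
      else
        stpLoop rest pixel_list pixel'

-- the 'while len(pixel) < 3: pixel.append(0)' loop
def stpPad (pixel : List Int) : List Int :=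
  if pixel.length < 3 then stpPad (pixel ++ [0]) else pixel
termination_by 3 - pixel.length

def string_to_pixels (s : String) : List (Int × Int × Int) :=
  let r := stpLoop s.toList [] []
  if r.2.length > 0 then r.1 ++ [pvTriple (stpPad r.2)] else r.1

-- ===== PORT B =====
-- tuple(normalize_color(c) for c in chunk) + (0,) * (3 - len(chunk)), as a fixed triple
def pvPadTriple (vals : List Int) : Int × Int × Int :=
  pvTriple (vals ++ List.replicate (3 - vals.length) 0)

def string_to_pixels_alt (s : String) : List (Int × Int × Int) :=
  let chars := s.toList
  (PySem.List.pyRange 0 chars.length 3).map (fun i =>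
    let chunk := PySem.List.slice chars (some i) (some (i + 3))
    pvPadTriple (chunk.map normalize_color))

-- ===== PRECONDITION & SPEC =====
def Spec_string_to_pixels (s : String) (out : List (Int × Int × Int)) : Prop := out = string_to_pixels_alt s
instance (s : String) (out : List (Int × Int × Int)) : Decidable (Spec_string_to_pixels s out) := by unfold Spec_string_to_pixels; infer_instance

-- ===== CLAIM (what is proved, stated in full; the proofs are below) =====
def Claim_equal_string_to_pixels : Prop := ∀ (s : String), Dom_string_to_pixels s → Spec_string_to_pixels s (string_to_pixels s)

-- ===== LEMMAS AND PROOFS =====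

-- common reference: the chunking both programs compute
def pvChunks : List Char → List (Int × Int × Int)
  | [] => []
  | [a] => [(normalize_color a, 0, 0)]
  | [a, b] => [(normalize_color a, normalize_color b, 0)]
  | a :: b :: c :: rest =>
      (normalize_color a, normalize_color b, normalize_color c) :: pvChunks rest

-- A's loop + trailing pad equals pvChunks
lemma stpA_run (l : List Char) (pl : List (Int × Int × Int)) :
    (let r := stpLoop l pl []
     if r.2.length > 0 then r.1 ++ [pvTriple (stpPad r.2)] else r.1) = pl ++ pvChunks l := by
  induction l using pvChunks.induct generalizing pl with
  | case1 => simp [stpLoop, pvChunks]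
  | case2 a =>
      simp [stpLoop, pvChunks]
      rw [stpPad, stpPad, stpPad]
      simp [pvTriple]
  | case3 a b =>
      simp [stpLoop, pvChunks]
      rw [stpPad, stpPad]
      simp [pvTriple]
  | case4 a b c rest ih =>
      show (let r := stpLoop (a :: b :: c :: rest) pl []
            if r.2.length > 0 then r.1 ++ [pvTriple (stpPad r.2)] else r.1) = _
      simp only [stpLoop, List.nil_append, List.length_cons, List.length_nil,
        List.cons_append]
      norm_num
      rw [ih]
      simp [pvChunks, pvTriple]

lemma pyR3 (l : List Char) (h : 0 < l.length) :
    PySem.List.pyRange 0 l.length 3 = (List.range ((l.length+2)/3)).map (fun k => ((3*k : Nat) : Int)) := by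
  rw [PySem.List.pyRange_of_pos _ _ (by norm_num)]
  simp only [if_pos (by exact_mod_cast h : (0:Int) < l.length)]
  congr 1
  · funext k; push_cast; ring
  · congr 1; omega

lemma slice3 (l : List Char) (k : Nat) :
    PySem.List.slice l (some ((3*k : Nat) : Int)) (some (((3*k : Nat) : Int) + 3)) = (l.drop (3*k)).take 3 := by
  have := PySem.List.slice_natCast_add (xs := l) (j := 3*k) (n := 3)
  simpa using this

lemma chunk_run (l : List Char) :
    (List.range ((l.length+2)/3)).map
      (fun k => pvPadTriple (((l.drop (3*k)).take 3).map normalize_color)) = pvChunks l := by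
  induction l using pvChunks.induct with
  | case1 => simp [pvChunks]
  | case2 a => simp [pvChunks, pvPadTriple, pvTriple, List.range_succ]
  | case3 a b => simp [pvChunks, pvPadTriple, pvTriple, List.range_succ]
  | case4 a b c rest ih =>
      have hc : ((a :: b :: c :: rest).length + 2) / 3 = (rest.length + 2) / 3 + 1 := by
        simp only [List.length_cons]; omega
      rw [hc, List.range_succ_eq_map, List.map_cons, List.map_map]
      have h0 : pvPadTriple ((((a :: b :: c :: rest).drop (3*0)).take 3).map normalize_color)
          = (normalize_color a, normalize_color b, normalize_color c) := by
        simp [pvPadTriple, pvTriple]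
      rw [h0]
      have h1 : ∀ k, ((a :: b :: c :: rest).drop (3*(k+1))) = rest.drop (3*k) := by
        intro k
        have : 3*(k+1) = (3*k) + 3 := by ring
        rw [this, Nat.add_comm]
        rw [← List.drop_drop]
        simp
      have : (List.range ((rest.length + 2) / 3)).map
          ((fun k => pvPadTriple ((((a :: b :: c :: rest).drop (3*k)).take 3).map normalize_color)) ∘ Nat.succ)
          = (List.range ((rest.length + 2) / 3)).map
          (fun k => pvPadTriple (((rest.drop (3*k)).take 3).map normalize_color)) := by
        apply List.map_congr_left
        intro k _
        simp only [Function.comp, Nat.succ_eq_add_one, h1]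
      rw [this, ih]
      simp [pvChunks]

lemma stpB_run (l : List Char) :
    (PySem.List.pyRange 0 l.length 3).map (fun i =>
      pvPadTriple ((PySem.List.slice l (some i) (some (i + 3))).map normalize_color))
      = pvChunks l := by
  rcases Nat.eq_zero_or_pos l.length with h | h
  · rw [List.length_eq_zero_iff.mp h]; decide
  · rw [pyR3 l h, List.map_map]
    rw [show ((fun i => pvPadTriple ((PySem.List.slice l (some i) (some (i + 3))).map normalize_color)) ∘ (fun k : Nat => ((3*k : Nat) : Int)))
        = fun k : Nat => pvPadTriple (((l.drop (3*k)).take 3).map normalize_color) from funext fun k => by simp only [Function.comp_apply]; rw [slice3]]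
    exact chunk_run l

theorem stp_eq (s : String) : string_to_pixels s = string_to_pixels_alt s := by
  unfold string_to_pixels string_to_pixels_alt
  rw [stpB_run]
  simpa using stpA_run s.toList []

-- ===== VERDICT (by name: the statement is the Claim_ definition above) =====
theorem string_to_pixels_spec : Claim_equal_string_to_pixels := by
  intro s _
  unfold Spec_string_to_pixels
  exact stp_eq s
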